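-- pv_equiv track=rewrite | github.com/milansamanta/multigame | tictactoe.py | player_turn
-- ===== SOURCE A (Python) =====
-- X = 'X'
--
-- O = 'O'
--
-- def player_turn(board):
--     count_X = sum(board[i][j] == X for i in range(3) for j in range(3))
--     count_O = sum(board[i][j] == O for i in range(3) for j in range(3))
--     if count_X == count_O:
--         return X
--     if count_X == count_O + 1:
--         return O
--     return None
-- ===== SOURCE B (Python) =====
-- def player_turn(board):
--     # pair-cancellation: collect the marks, then repeatedly cancel one X against one O;
--     # the leftover list decides the turn
--     marks = [board[i][j] for i in range(3) for j in range(3) if board[i][j] in ('X', 'O')]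
--     while 'X' in marks and 'O' in marks:
--         marks.remove('X')
--         marks.remove('O')
--     if not marks:
--         return 'X'
--     if marks == ['X']:
--         return 'O'
--     return None
-- ===== Notes on version B (the rewrite author's own statement) =====
-- stated objective: alternative
-- what changed: B replaces A's two counting scans and arithmetic comparison by a pair-cancellation algorithm: it collects the marks, repeatedly cancels one X against one O, and decides from the leftover list ([] -> X, ['X'] -> O, anything else -> None).
import Mathlib
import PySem

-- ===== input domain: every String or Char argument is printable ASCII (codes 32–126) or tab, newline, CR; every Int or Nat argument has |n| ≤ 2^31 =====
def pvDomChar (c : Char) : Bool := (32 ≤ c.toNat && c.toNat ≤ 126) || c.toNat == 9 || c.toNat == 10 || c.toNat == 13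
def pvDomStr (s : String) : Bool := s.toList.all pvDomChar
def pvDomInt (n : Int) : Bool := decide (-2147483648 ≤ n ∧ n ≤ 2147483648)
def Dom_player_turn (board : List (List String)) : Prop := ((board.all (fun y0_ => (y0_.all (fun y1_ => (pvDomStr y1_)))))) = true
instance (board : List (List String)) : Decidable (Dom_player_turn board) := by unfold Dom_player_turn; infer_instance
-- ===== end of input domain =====

-- B replaces A's two counting scans by pair-cancellation: collect the marks, repeatedly
-- cancel one X against one O, and decide the turn from the leftover list.

-- shared cell accessor board[i][j] (none = IndexError; Pre_ excludes such boards)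
def pvCell (board : List (List String)) (i j : Int) : Option String :=
  PySem.List.pyGet? ((PySem.List.pyGet? board i).getD []) j

-- ===== PORT A =====
def player_turn (board : List (List String)) : Option String :=
  let count_X : Int := (PySem.List.pyRange 0 3 1).foldl (fun acc i =>
      (PySem.List.pyRange 0 3 1).foldl (fun acc2 j =>
        acc2 + (if pvCell board i j = some "X" then 1 else 0)) acc) 0
  let count_O : Int := (PySem.List.pyRange 0 3 1).foldl (fun acc i =>
      (PySem.List.pyRange 0 3 1).foldl (fun acc2 j =>
        acc2 + (if pvCell board i j = some "O" then 1 else 0)) acc) 0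
  if count_X = count_O then some "X"
  else if count_X = count_O + 1 then some "O"
  else none

-- ===== PORT B =====
-- the list comprehension building `marks`
def pvMarks (board : List (List String)) : List String :=
  (PySem.List.pyRange 0 3 1).foldl (fun acc i =>
    (PySem.List.pyRange 0 3 1).foldl (fun acc2 j =>
      match pvCell board i j with
      | some s => if s = "X" ∨ s = "O" then acc2 ++ [s] else acc2
      | none => acc2) acc) []

-- the `while 'X' in marks and 'O' in marks:` loop (marks.remove('X'); marks.remove('O'))
def pvCancel (ms : List String) : List String :=
  if h : "X" ∈ ms ∧ "O" ∈ ms then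
    pvCancel ((PySem.List.remove? ((PySem.List.remove? ms "X").getD ms) "O").getD
              ((PySem.List.remove? ms "X").getD ms))
  else ms
termination_by ms.length
decreasing_by
  rw [PySem.List.remove?_eq_some_erase _ _ h.1, Option.getD_some]
  have hO : "O" ∈ ms.erase "X" := (List.mem_erase_of_ne (by decide)).2 h.2
  rw [PySem.List.remove?_eq_some_erase _ _ hO, Option.getD_some]
  have h1 : (ms.erase "X").length = ms.length - 1 := List.length_erase_of_mem h.1
  have h0 : 0 < ms.length := List.length_pos_of_mem h.1
  have h2 : ((ms.erase "X").erase "O").length ≤ (ms.erase "X").length := List.length_erase_le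
  omega

def player_turn_alt (board : List (List String)) : Option String :=
  let marks := pvCancel (pvMarks board)
  if marks = [] then some "X"
  else if marks = ["X"] then some "O"
  else none

-- ===== PRECONDITION & SPEC =====
-- Pre_ excludes exactly the boards without a full 3x3 top-left area, on which both Pythons raise IndexError.
def Pre_player_turn (board : List (List String)) : Prop :=
  3 ≤ board.length ∧ ∀ r ∈ board.take 3, 3 ≤ r.length
instance (board : List (List String)) : Decidable (Pre_player_turn board) := by
  unfold Pre_player_turn; infer_instance
def pvWitness_player_turn : List (List String) :=
  [["X", "O", " "], [" ", "X", " "], [" ", " ", " "]]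
def Spec_player_turn (board : List (List String)) (out : Option String) : Prop := out = player_turn_alt board
instance (board : List (List String)) (out : Option String) : Decidable (Spec_player_turn board out) := by unfold Spec_player_turn; infer_instance

-- ===== CLAIM =====
def Claim_equal_player_turn : Prop := ∀ (board : List (List String)), Dom_player_turn board → Pre_player_turn board → Spec_player_turn board (player_turn board)

-- ===== LEMMAS AND PROOFS =====

-- the comprehension's filter/map step, as a filterMap function
def pvKeep (c : Option String) : Option String :=
  match c with
  | some s => if s = "X" ∨ s = "O" then some s else none
  | none => none

theorem pv_marks_filterMap (cells : List (Option String)) (acc : List String) :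
    cells.foldl (fun acc2 c =>
      match c with
      | some s => if s = "X" ∨ s = "O" then acc2 ++ [s] else acc2
      | none => acc2) acc = acc ++ cells.filterMap pvKeep := by
  induction cells generalizing acc with
  | nil => simp
  | cons c cs ih =>
    simp only [List.foldl, List.filterMap]
    cases c with
    | none => simp [ih, pvKeep]
    | some s =>
      by_cases h : s = "X" ∨ s = "O" <;>
        simp [pvKeep, h, ih]

theorem pv_count_fold_X (cells : List (Option String)) (a : Int) :
    cells.foldl (fun acc c => acc + (if c = some "X" then 1 else 0)) a
    = a + ((cells.filterMap pvKeep).count "X" : Int) := by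
  induction cells generalizing a with
  | nil => simp
  | cons c cs ih =>
    simp only [List.foldl, List.filterMap]
    cases c with
    | none => simpa using ih a
    | some s =>
      by_cases hx : s = "X"
      · subst hx
        simp [pvKeep, ih]
        omega
      · by_cases ho : s = "O"
        · subst ho
          simp [pvKeep, ih]
        · simp [pvKeep, hx, ho, ih]

theorem pv_count_fold_O (cells : List (Option String)) (a : Int) :
    cells.foldl (fun acc c => acc + (if c = some "O" then 1 else 0)) a
    = a + ((cells.filterMap pvKeep).count "O" : Int) := by
  induction cells generalizing a with
  | nil => simp
  | cons c cs ih =>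
    simp only [List.foldl, List.filterMap]
    cases c with
    | none => simpa using ih a
    | some s =>
      by_cases ho : s = "O"
      · subst ho
        simp [pvKeep, ih]
        omega
      · by_cases hx : s = "X"
        · subst hx
          simp [pvKeep, ho, ih]
        · simp [pvKeep, hx, ho, ih]

-- every element of the marks list is "X" or "O"
theorem pv_marks_mem (cells : List (Option String)) :
    ∀ s ∈ cells.filterMap pvKeep, s = "X" ∨ s = "O" := by
  intro s hs
  obtain ⟨c, _, hc⟩ := List.mem_filterMap.1 hs
  cases c with
  | none => simp [pvKeep] at hc
  | some t =>
    by_cases h : t = "X" ∨ t = "O"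
    · simp [pvKeep, h] at hc; subst hc; exact h
    · simp [pvKeep, h] at hc

-- the cancellation loop, characterised by the two counts
theorem pv_cancel_eq (ms : List String) (hall : ∀ s ∈ ms, s = "X" ∨ s = "O") :
    pvCancel ms =
      if ms.count "O" ≤ ms.count "X" then List.replicate (ms.count "X" - ms.count "O") "X"
      else List.replicate (ms.count "O" - ms.count "X") "O" := by
  induction hn : ms.length using Nat.strong_induction_on generalizing ms with
  | _ n ih =>
  rw [pvCancel.eq_def]
  by_cases h : "X" ∈ ms ∧ "O" ∈ ms
  · rw [dif_pos h]
    rw [PySem.List.remove?_eq_some_erase _ _ h.1, Option.getD_some]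
    have hO : "O" ∈ ms.erase "X" := (List.mem_erase_of_ne (by decide)).2 h.2
    rw [PySem.List.remove?_eq_some_erase _ _ hO, Option.getD_some]
    set t := (ms.erase "X").erase "O" with ht
    have hlen : t.length < ms.length := by
      have h1 : (ms.erase "X").length = ms.length - 1 := List.length_erase_of_mem h.1
      have h0 : 0 < ms.length := List.length_pos_of_mem h.1
      have h2 : t.length ≤ (ms.erase "X").length := List.length_erase_le
      omega
    have hallt : ∀ s ∈ t, s = "X" ∨ s = "O" := fun s hs =>
      hall s (List.mem_of_mem_erase (List.mem_of_mem_erase hs))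
    have hcx : t.count "X" = ms.count "X" - 1 := by
      rw [ht, List.count_erase_of_ne (by decide), List.count_erase_self]
    have hco : t.count "O" = ms.count "O" - 1 := by
      rw [ht, List.count_erase_self, List.count_erase_of_ne (by decide)]
    have hx1 : 1 ≤ ms.count "X" := List.one_le_count_iff.2 h.1
    have ho1 : 1 ≤ ms.count "O" := List.one_le_count_iff.2 h.2
    rw [ih t.length (hn ▸ hlen) t hallt rfl, hcx, hco]
    by_cases hc : ms.count "O" ≤ ms.count "X"
    · rw [if_pos (by omega), if_pos hc,
          show ms.count "X" - 1 - (ms.count "O" - 1) = ms.count "X" - ms.count "O" by omega]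
    · rw [if_neg (by omega), if_neg hc,
          show ms.count "O" - 1 - (ms.count "X" - 1) = ms.count "O" - ms.count "X" by omega]
  · rw [dif_neg h]
    rw [Classical.not_and_iff_not_or_not] at h
    cases h with
    | inl hx =>
      have hcx : ms.count "X" = 0 := List.count_eq_zero.2 hx
      have hmem : ∀ s ∈ ms, s = "O" := by
        intro s hs
        rcases hall s hs with h' | h'
        · exact absurd (h' ▸ hs) hx
        · exact h'
      have hco : ms.count "O" = ms.length := by
        rw [List.count_eq_length]; intro b hb; exact (hmem b hb).symm
      by_cases hz : ms.length = 0
      · have : ms = [] := List.length_eq_zero_iff.1 hz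
        subst this; simp
      · rw [if_neg (by omega), hcx, hco, Nat.sub_zero]
        exact (List.eq_replicate_iff.2 ⟨rfl, hmem⟩)
    | inr ho =>
      have hco : ms.count "O" = 0 := List.count_eq_zero.2 ho
      have hmem : ∀ s ∈ ms, s = "X" := by
        intro s hs
        rcases hall s hs with h' | h'
        · exact h'
        · exact absurd (h' ▸ hs) ho
      have hcx : ms.count "X" = ms.length := by
        rw [List.count_eq_length]; intro b hb; exact (hmem b hb).symm
      rw [if_pos (by omega), hcx, hco, Nat.sub_zero]
      exact (List.eq_replicate_iff.2 ⟨rfl, hmem⟩)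

theorem pv_repl_nil (n : ℕ) (a : String) : (List.replicate n a = [] ↔ n = 0) := by
  cases n <;> simp

theorem pv_repl_singleton (n : ℕ) (a : String) :
    List.replicate n a = ["X"] ↔ n = 1 ∧ a = "X" := by
  cases n with
  | zero => simp
  | succ m => cases m <;> simp [List.replicate, and_comm]

-- the whole decision, stated over an arbitrary list of cells
theorem pv_main (cells : List (Option String)) :
    (if cells.foldl (fun x c => x + (if c = some "X" then 1 else 0)) (0 : Int)
        = cells.foldl (fun y c => y + (if c = some "O" then 1 else 0)) (0 : Int) then some "X"
     else if cells.foldl (fun x c => x + (if c = some "X" then 1 else 0)) (0 : Int)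
        = cells.foldl (fun y c => y + (if c = some "O" then 1 else 0)) (0 : Int) + 1 then some "O"
     else none)
    = (if pvCancel (cells.filterMap pvKeep) = [] then some "X"
       else if pvCancel (cells.filterMap pvKeep) = ["X"] then some "O"
       else none) := by
  rw [pv_count_fold_X, pv_count_fold_O, pv_cancel_eq _ (pv_marks_mem cells)]
  set cx := (cells.filterMap pvKeep).count "X" with hcx
  set co := (cells.filterMap pvKeep).count "O" with hco
  clear_value cx co
  simp only [zero_add]
  by_cases hc : co ≤ cx
  · rw [if_pos hc]
    simp only [pv_repl_nil, pv_repl_singleton]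
    split_ifs <;> (try simp_all) <;> first | rfl | omega
  · rw [if_neg hc]
    simp only [pv_repl_nil, pv_repl_singleton]
    split_ifs <;> (try simp_all) <;> first | rfl | omega
-- the comprehension over the nine cells is the filterMap over the 9-cell list
theorem pv_marks_eq (board : List (List String)) :
    pvMarks board = List.filterMap pvKeep
      [pvCell board 0 0, pvCell board 0 1, pvCell board 0 2,
       pvCell board 1 0, pvCell board 1 1, pvCell board 1 2,
       pvCell board 2 0, pvCell board 2 1, pvCell board 2 2] := by
  have h := pv_marks_filterMap
    [pvCell board 0 0, pvCell board 0 1, pvCell board 0 2,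
     pvCell board 1 0, pvCell board 1 1, pvCell board 1 2,
     pvCell board 2 0, pvCell board 2 1, pvCell board 2 2] []
  simp only [List.nil_append] at h
  exact h

-- ===== VERDICT =====
theorem player_turn_spec : Claim_equal_player_turn := by
  intro board _ _
  unfold Spec_player_turn player_turn player_turn_alt
  simp only [pv_marks_eq]
  exact pv_main [pvCell board 0 0, pvCell board 0 1, pvCell board 0 2,
                 pvCell board 1 0, pvCell board 1 1, pvCell board 1 2,
                 pvCell board 2 0, pvCell board 2 1, pvCell board 2 2]
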